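-- pv_equiv track=rewrite | github.com/arathyrose/iss-a4 | app/vernam.py | check_key
-- ===== SOURCE A (Python) =====
-- def check_key(key):
--     if (key == ""):
--         return 0
--     zero = 0
--     one = 0
--     for i in key:
--         if (i == "0"):
--             zero += 1
--         elif (i == "1"):
--             one += 1
--         else:
--             return 0
--     if(zero == one) or (zero == one+1) or (zero+1 == one):
--         return 1
--     else:
--         return 0
-- ===== SOURCE B (Python) =====
-- def check_key(key):
--     # Cancellation stack: each '0' annihilates a pending '1' and vice versa;
--     # the key is valid iff at most one unpaired bit remains.
--     if not key:
--         return 0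
--     stack = []
--     for c in key:
--         if c not in "01":
--             return 0
--         if stack and stack[-1] != c:
--             stack.pop()
--         else:
--             stack.append(c)
--     return 1 if len(stack) <= 1 else 0
-- ===== Notes on version B (the rewrite author's own statement) =====
-- stated objective: alternative
-- what changed: Replaces A's two explicit counters and three-way balance test with a cancellation stack: each bit pops a pending opposite bit or is pushed, and the key is valid iff at most one unpaired bit remains on the stack.
import Mathlib
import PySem

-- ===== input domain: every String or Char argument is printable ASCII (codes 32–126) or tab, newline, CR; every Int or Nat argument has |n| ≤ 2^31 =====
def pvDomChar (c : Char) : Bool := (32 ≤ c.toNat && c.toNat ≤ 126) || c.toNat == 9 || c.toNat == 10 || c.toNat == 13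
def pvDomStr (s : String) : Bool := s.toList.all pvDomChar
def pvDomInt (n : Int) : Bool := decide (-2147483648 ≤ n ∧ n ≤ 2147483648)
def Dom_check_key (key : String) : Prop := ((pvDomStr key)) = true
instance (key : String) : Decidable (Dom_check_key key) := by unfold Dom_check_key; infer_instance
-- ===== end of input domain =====

-- B replaces A's two counters and three-way balance test with a cancellation stack pairing opposite bits; return value only, no speed claim.

-- ===== PORT A =====
-- A's for-loop with early return: recursion over the chars carrying (zero, one); none = early `return 0`.
def ckLoopA : List Char → Int → Int → Option (Int × Int)
  | [], z, o => some (z, o)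
  | c :: cs, z, o =>
      if c = '0' then ckLoopA cs (z + 1) o
      else if c = '1' then ckLoopA cs z (o + 1)
      else none

def check_key (key : String) : Int :=
  if key = "" then 0
  else
    match ckLoopA key.toList 0 0 with
    | none => 0
    | some (z, o) => if z = o ∨ z = o + 1 ∨ z + 1 = o then 1 else 0

-- ===== PORT B =====
-- B's cancellation-stack loop: the Python list used as a stack (append/pop at the end,
-- stack[-1] = top) is modelled with the top at the head (cons = push, tail = pop);
-- none = early `return 0` on an invalid character.
def ckStackB : List Char → List Char → Option (List Char)
  | [], st => some st
  | c :: cs, st =>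
      if ¬ (c = '0' ∨ c = '1') then none
      else
        match st with
        | t :: rest => if t ≠ c then ckStackB cs rest else ckStackB cs (c :: t :: rest)
        | [] => ckStackB cs [c]

def check_key_alt (key : String) : Int :=
  if key = "" then 0
  else
    match ckStackB key.toList [] with
    | none => 0
    | some st => if st.length ≤ 1 then 1 else 0

-- ===== PRECONDITION & SPEC =====
def Spec_check_key (key : String) (out : Int) : Prop := out = check_key_alt key
instance (key : String) (out : Int) : Decidable (Spec_check_key key out) := by unfold Spec_check_key; infer_instance

-- ===== CLAIM (what is proved, stated in full; the proofs are below) =====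
def Claim_equal_check_key : Prop := ∀ (key : String), Dom_check_key key → Spec_check_key key (check_key key)

-- ===== LEMMAS AND PROOFS =====

-- Encode B's stack by a signed count: d ≥ 0 ↦ d zeros, d < 0 ↦ -d ones.
def ckEnc (d : Int) : List Char :=
  if 0 ≤ d then List.replicate d.toNat '0' else List.replicate (-d).toNat '1'

theorem ckEnc_length (d : Int) : (ckEnc d).length = d.natAbs := by
  unfold ckEnc; split <;> simp <;> omega

-- A's loop succeeds iff every char is '0' or '1', then returns the counters plus the counts.
theorem ckLoopA_eq (cs : List Char) : ∀ (z o : Int),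
    ckLoopA cs z o =
      if cs.all (fun c => c = '0' || c = '1')
      then some (z + cs.count '0', o + cs.count '1')
      else none := by
  induction cs with
  | nil => intro z o; simp [ckLoopA]
  | cons c cs ih =>
    intro z o
    by_cases h0 : c = '0'
    · simp [ckLoopA, h0, ih, List.count_cons]
      split <;> simp <;> ring
    · by_cases h1 : c = '1'
      · simp [ckLoopA, h0, h1, ih, List.count_cons]
        split <;> simp <;> ring
      · simp [ckLoopA, h0, h1]

-- One step of B's stack on '0' bumps the encoded count, on '1' drops it.
theorem ckEnc_step0 (d : Int) :
    (match ckEnc d with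
      | t :: rest => if t ≠ '0' then rest else '0' :: t :: rest
      | [] => ['0']) = ckEnc (d + 1) := by
  unfold ckEnc
  rcases lt_trichotomy d 0 with h | h | h
  · have hn : (-d).toNat = ((-(d+1)).toNat) + 1 := by omega
    rw [if_neg (by omega), hn, List.replicate_succ]
    by_cases h1 : d + 1 = 0
    · simp [h1]
    · rw [if_neg (by omega)]; simp
  · subst h; simp [List.replicate]
  · rw [if_pos (by omega), if_pos (by omega)]
    have hn : (d+1).toNat = d.toNat + 1 := by omega
    have hd : d.toNat = (d.toNat - 1) + 1 := by omega
    rw [hn, hd, List.replicate_succ]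
    simp [List.replicate_succ]

theorem ckEnc_step1 (d : Int) :
    (match ckEnc d with
      | t :: rest => if t ≠ '1' then rest else '1' :: t :: rest
      | [] => ['1']) = ckEnc (d - 1) := by
  unfold ckEnc
  rcases lt_trichotomy d 0 with h | h | h
  · rw [if_neg (by omega), if_neg (by omega)]
    have hn : (-(d-1)).toNat = ((-d).toNat) + 1 := by omega
    have hd : (-d).toNat = ((-d).toNat - 1) + 1 := by omega
    rw [hn, hd, List.replicate_succ]
    simp [List.replicate_succ]
  · subst h; simp [List.replicate]
  · have hn : d.toNat = ((d-1).toNat) + 1 := by omega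
    rw [if_pos (by omega), hn, List.replicate_succ]
    by_cases h1 : (0:Int) ≤ d - 1
    · rw [if_pos h1]; simp
    · have : d = 1 := by omega
      subst this; simp [List.replicate]

-- B's loop on an encoded stack: succeeds iff all chars valid, result is the encoded balance.
theorem ckStackB_eq (cs : List Char) : ∀ (d : Int),
    ckStackB cs (ckEnc d) =
      if cs.all (fun c => c = '0' || c = '1')
      then some (ckEnc (d + cs.count '0' - cs.count '1'))
      else none := by
  induction cs with
  | nil => intro d; simp [ckStackB]
  | cons c cs ih =>
    intro d
    by_cases h0 : c = '0'
    · subst h0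
      have step : ckStackB ('0' :: cs) (ckEnc d) = ckStackB cs (ckEnc (d + 1)) := by
        rw [← ckEnc_step0 d]
        rcases hE : ckEnc d with _ | ⟨t, rest⟩
        · simp [ckStackB]
        · by_cases ht : t = '0' <;> simp [ckStackB, ht]
      rw [step, ih]
      by_cases hcs : (cs.all fun c => c = '0' || c = '1') = true
      · simp [hcs, List.count_cons]
        congr 1
        push_cast
        ring
      · simp [hcs]
    · by_cases h1 : c = '1'
      · subst h1
        have step : ckStackB ('1' :: cs) (ckEnc d) = ckStackB cs (ckEnc (d - 1)) := by
          rw [← ckEnc_step1 d]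
          rcases hE : ckEnc d with _ | ⟨t, rest⟩
          · simp [ckStackB, h0]
          · by_cases ht : t = '1' <;> simp [ckStackB, ht, h0]
        rw [step, ih]
        by_cases hcs : (cs.all fun c => c = '0' || c = '1') = true
        · simp [hcs, List.count_cons, h0]
          congr 1
          push_cast
          ring
        · simp [hcs]
      · simp [ckStackB, h0, h1]

theorem check_key_eq_alt (key : String) : check_key key = check_key_alt key := by
  unfold check_key check_key_alt
  by_cases he : key = ""
  · simp [he]
  · simp only [he, if_false]
    have hB : ckStackB key.toList [] = ckStackB key.toList (ckEnc 0) := by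
      simp [ckEnc, List.replicate]
    rw [ckLoopA_eq, hB, ckStackB_eq]
    by_cases hall : key.toList.all (fun c => c = '0' || c = '1') = true
    · simp only [hall, if_true]
      rw [ckEnc_length]
      split_ifs with ha hb hb <;> first | rfl | omega
    · simp [hall]

-- ===== VERDICT (by name: the statement is the Claim_ definition above) =====
theorem check_key_spec : Claim_equal_check_key := by
  intro key _
  exact check_key_eq_alt key
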